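-- pv_equiv track=rewrite | github.com/antoni9/MIT-OpenCourseWare | ps5_ghost.py | wordTest
-- ===== SOURCE A (Python) =====
-- def wordTest(word, wordlist):
--     x = -1
--     if len(word) < 3:
--         return None
--     else:
--         if word in wordlist:
--             return True
--         else:
--             for i in wordlist:
--                 if i.find(word) == 0:
--                     x = i.find(word)
--                     return None
--             if x != 0:
--                 return False
-- ===== SOURCE B (Python) =====
-- def wordTest(word, wordlist):
--     if len(word) < 3:
--         return None
--     found_prefix = False
--     for w in wordlist:
--         if w == word:
--             return True
--         if w.startswith(word):
--             found_prefix = True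
--     return None if found_prefix else False
-- ===== Notes on version B (the rewrite author's own statement) =====
-- stated objective: simpler
-- what changed: Replaces A's two sequential scans (membership test, then a prefix loop with a vestigial x variable) by one pass that returns True on an exact match and maintains a found_prefix flag, deciding None/False after the loop.
import Mathlib
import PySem

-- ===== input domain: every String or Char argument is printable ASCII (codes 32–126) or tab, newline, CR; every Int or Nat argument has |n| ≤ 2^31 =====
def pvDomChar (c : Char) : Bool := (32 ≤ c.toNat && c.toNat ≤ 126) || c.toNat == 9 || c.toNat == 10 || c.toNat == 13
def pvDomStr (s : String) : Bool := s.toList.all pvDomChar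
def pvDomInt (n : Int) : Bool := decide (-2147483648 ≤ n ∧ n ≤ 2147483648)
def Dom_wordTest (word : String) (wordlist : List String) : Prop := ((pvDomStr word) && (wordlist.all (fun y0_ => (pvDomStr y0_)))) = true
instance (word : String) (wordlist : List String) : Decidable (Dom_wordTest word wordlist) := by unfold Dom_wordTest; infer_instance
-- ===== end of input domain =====

-- B merges A's two sequential scans (membership test, then prefix loop) into one pass with a found_prefix flag; objective: simpler.


-- ===== PORT A =====
-- A's for-loop over wordlist, carrying the (vestigial) x variable; after the loop 'if x != 0: return False' else fall through (None)
def wordTestLoopA (word : String) (x : Int) : List String → Option Bool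
  | [] => if x ≠ 0 then some false else none
  | i :: rest =>
    if PySem.Str.find i word = 0 then none
    else wordTestLoopA word x rest

def wordTest (word : String) (wordlist : List String) : Option Bool :=
  if PySem.Str.len word < 3 then none
  else if word ∈ wordlist then some true
  else wordTestLoopA word (-1) wordlist

-- ===== PORT B =====
-- B's single pass: early True on exact match, found_prefix flag otherwise
def wordTestLoopB (word : String) : List String → Bool → Option Bool
  | [], fp => if fp then none else some false
  | w :: rest, fp =>
    if w = word then some true
    else wordTestLoopB word rest (fp || PySem.Str.startswith w word)

def wordTest_alt (word : String) (wordlist : List String) : Option Bool :=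
  if PySem.Str.len word < 3 then none
  else wordTestLoopB word wordlist false

-- ===== PRECONDITION & SPEC =====
def Spec_wordTest (word : String) (wordlist : List String) (out : Option Bool) : Prop := out = wordTest_alt word wordlist
instance (word : String) (wordlist : List String) (out : Option Bool) : Decidable (Spec_wordTest word wordlist out) := by unfold Spec_wordTest; infer_instance

-- ===== CLAIM (what is proved, stated in full; the proofs are below) =====
def Claim_equal_wordTest : Prop := ∀ (word : String) (wordlist : List String), Dom_wordTest word wordlist → Spec_wordTest word wordlist (wordTest word wordlist)

-- ===== LEMMAS AND PROOFS =====

-- i.find(word) == 0 is exactly i.startswith(word)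
theorem chars_find_eq_zero_iff (s sub : List Char) :
    PySem.Chars.find s sub = 0 ↔ sub <+: s := by
  constructor
  · intro h
    have h0 : 0 ≤ PySem.Chars.find s sub := by omega
    have := (PySem.Chars.find_spec h0).1
    simpa [h] using this
  · intro h
    have h0 : 0 ≤ PySem.Chars.find s sub := by
      rw [PySem.Chars.find_nonneg_iff]
      exact h.isInfix
    have hspec := PySem.Chars.find_spec h0
    by_contra hne
    have hpos : 0 < (PySem.Chars.find s sub).toNat := by omega
    exact hspec.2 0 hpos (by simpa using h)

theorem find_zero_iff_startswith (i word : String) :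
    (PySem.Str.find i word = 0) ↔ PySem.Str.startswith i word = true := by
  rw [PySem.Str.find_eq, PySem.Str.startswith_eq, PySem.Chars.startswith_iff,
    chars_find_eq_zero_iff]

theorem loopB_mem (word : String) (l : List String) :
    ∀ fp : Bool, word ∈ l → wordTestLoopB word l fp = some true := by
  induction l with
  | nil => intro fp h; cases h
  | cons w rest ih =>
    intro fp h
    by_cases hw : w = word
    · simp [wordTestLoopB, hw]
    · have hm : word ∈ rest := (List.mem_cons.mp h).resolve_left (fun e => hw e.symm)
      simp [wordTestLoopB, hw, ih _ hm]

theorem loopB_not_mem (word : String) (l : List String) :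
    ∀ fp : Bool, word ∉ l → wordTestLoopB word l fp =
      if fp || l.any (fun w => PySem.Str.startswith w word) then none else some false := by
  induction l with
  | nil => intro fp _; simp [wordTestLoopB]
  | cons w rest ih =>
    intro fp h
    have hw : ¬ w = word := fun e => h (e ▸ List.mem_cons_self)
    have hrest : word ∉ rest := fun m => h (List.mem_cons_of_mem _ m)
    simp [wordTestLoopB, hw, ih _ hrest, Bool.or_assoc]

theorem loopA_eq (word : String) (l : List String) :
    wordTestLoopA word (-1) l =
      if l.any (fun w => PySem.Str.startswith w word) then none else some false := by
  induction l with
  | nil => simp [wordTestLoopA]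
  | cons i rest ih =>
    by_cases hf : PySem.Str.find i word = 0
    · have hs : PySem.Str.startswith i word = true := (find_zero_iff_startswith i word).mp hf
      rw [PySem.Str.find_eq] at hf
      rw [PySem.Str.startswith_eq] at hs
      simp [wordTestLoopA, hf, hs]
    · have : PySem.Str.startswith i word = false := by
        rcases Bool.eq_false_or_eq_true (PySem.Str.startswith i word) with h | h
        · exact absurd ((find_zero_iff_startswith i word).mpr h) hf
        · exact h
      rw [PySem.Str.find_eq] at hf
      rw [PySem.Str.startswith_eq] at this
      simp [wordTestLoopA, hf, ih, this]

-- ===== VERDICT (by name: the statement is the Claim_ definition above) =====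
theorem wordTest_spec : Claim_equal_wordTest := by
  intro word wordlist _
  unfold Spec_wordTest wordTest wordTest_alt
  by_cases hlen : PySem.Str.len word < 3
  · rw [if_pos hlen, if_pos hlen]
  · rw [if_neg hlen, if_neg hlen]
    by_cases hmem : word ∈ wordlist
    · rw [if_pos hmem, loopB_mem word wordlist false hmem]
    · rw [if_neg hmem, loopA_eq, loopB_not_mem word wordlist false hmem]
      simp
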